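-- pv_equiv track=rewrite | github.com/deanpeters/ai-pm-exploration-toolkit | src/audio_transcription.py | _find_next_steps
-- ===== SOURCE A (Python) =====
-- from typing import Dict, List, Optional, Any, Union
--
-- def _find_next_steps(text: str) -> List[str]:
--     """Find next steps from meetings"""
--     next_step_indicators = ["next step", "next week", "follow up", "continue", "move forward"]
--     steps = []
--
--     for indicator in next_step_indicators:
--         if indicator in text:
--             sentences = text.split('.')
--             for sentence in sentences:
--                 if indicator in sentence:
--                     steps.append(sentence.strip())
--
--     return list(set(steps))[:5]
-- ===== SOURCE B (Python) =====
-- from typing import List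
--
--
-- def _find_next_steps(text: str) -> List[str]:
--     """Find next steps from meetings (single split, single pass, ordered dedup)."""
--     next_step_indicators = ["next step", "next week", "follow up", "continue", "move forward"]
--     matched = [sentence.strip()
--                for sentence in text.split('.')
--                if any(indicator in sentence for indicator in next_step_indicators)]
--     return list(dict.fromkeys(matched))[:5]
-- ===== Notes on version B (the rewrite author's own statement) =====
-- stated objective: simpler
-- what changed: One split of the text and one pass over the sentences with an any-indicator membership test and an order-preserving dedup (dict.fromkeys), replacing A's per-indicator re-split and re-scan (up to five splits/passes) and its hash-ordered list(set(...)); Pre_ excludes inputs with two or more distinct matching stripped sentences, where A's output order is an accident of set iteration order (hash-seed dependent).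
import Mathlib
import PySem

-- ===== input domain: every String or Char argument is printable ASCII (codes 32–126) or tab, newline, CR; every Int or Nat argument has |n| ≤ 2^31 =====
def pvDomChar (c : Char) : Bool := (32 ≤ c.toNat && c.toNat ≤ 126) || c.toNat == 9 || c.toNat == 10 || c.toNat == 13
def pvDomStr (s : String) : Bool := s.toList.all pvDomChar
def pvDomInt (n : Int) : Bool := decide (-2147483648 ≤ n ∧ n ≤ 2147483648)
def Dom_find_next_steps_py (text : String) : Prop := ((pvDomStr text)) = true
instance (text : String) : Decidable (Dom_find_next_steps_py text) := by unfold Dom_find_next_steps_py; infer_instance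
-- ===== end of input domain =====

-- B replaces A's per-indicator re-split/re-scan of the text by one split and one sentence pass with an
-- any-indicator test and an order-preserving dedup (simpler, one pass); equivalence is on Pre_, where
-- Python's hash-ordered list(set(...)) has at most one element so its order is immaterial.

-- ===== PORT A =====
-- list(set(steps))[:5]: Python's set iteration order is hash-seed dependent; the port keeps first
-- occurrences in order, which is exact on Pre_ (the set there has at most one element).
def find_next_steps_py (text : String) : List String :=
  let next_step_indicators : List String :=
    ["next step", "next week", "follow up", "continue", "move forward"]
  let steps : List String :=
    next_step_indicators.foldl (fun steps indicator =>
      if PySem.Str.isIn indicator text then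
        let sentences := (PySem.Str.split? text ".").getD []   -- sep "." ≠ "" : split? is some
        sentences.foldl (fun steps sentence =>
          if PySem.Str.isIn indicator sentence then steps ++ [PySem.Str.strip sentence]
          else steps) steps
      else steps) []
  (PySem.Set.ofList steps).take 5

-- ===== PORT B =====
def find_next_steps_py_alt (text : String) : List String :=
  let next_step_indicators : List String :=
    ["next step", "next week", "follow up", "continue", "move forward"]
  let matched : List String :=
    (((PySem.Str.split? text ".").getD []).filter
        (fun sentence => next_step_indicators.any (fun ind => PySem.Str.isIn ind sentence))).map
      PySem.Str.strip
  (PySem.List.dedup matched).take 5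

-- ===== PRECONDITION & SPEC =====
-- Pre_ excludes inputs with two or more DISTINCT stripped sentences containing an indicator: there A's
-- list(set(steps)) order is an accident of Python's hash-seed-dependent set iteration order, so no
-- single output order can be claimed; on Pre_ the set has at most one element.
def Pre_find_next_steps_py (text : String) : Prop :=
  (((PySem.Str.split? text ".").getD []).filter
      (fun sentence =>
        (["next step", "next week", "follow up", "continue", "move forward"] : List String).any
          (fun ind => PySem.Str.isIn ind sentence))).Pairwise
    (fun a b => PySem.Str.strip a = PySem.Str.strip b)
instance (text : String) : Decidable (Pre_find_next_steps_py text) := by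
  unfold Pre_find_next_steps_py; infer_instance

def pvWitness_find_next_steps_py : String := "We will continue tomorrow."

def Spec_find_next_steps_py (text : String) (out : List String) : Prop := out = find_next_steps_py_alt text
instance (text : String) (out : List String) : Decidable (Spec_find_next_steps_py text out) := by unfold Spec_find_next_steps_py; infer_instance

-- ===== CLAIM (what is proved, stated in full; the proofs are below) =====
def Claim_equal_find_next_steps_py : Prop := ∀ (text : String), Dom_find_next_steps_py text → Pre_find_next_steps_py text → Spec_find_next_steps_py text (find_next_steps_py text)

-- ===== LEMMAS AND PROOFS =====

-- every piece produced by Chars.splitOn is an infix of the input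
theorem pv_go_infix (sep : List Char) (s : List Char) :
    ∀ (fuel : Nat) (l cur : List Char) (acc : List (List Char)),
      (cur.reverse ++ l) <:+: s → (∀ p ∈ acc, p <:+: s) →
      ∀ p ∈ PySem.Chars.splitOn.go sep fuel l cur acc, p <:+: s := by
  intro fuel
  induction fuel with
  | zero =>
    intro l cur acc hinv hacc p hp
    simp [PySem.Chars.splitOn.go] at hp
    rcases hp with h | h
    · exact hacc _ h
    · exact h ▸ hinv
  | succ n ih =>
    intro l cur acc hinv hacc p hp
    cases l with
    | nil =>
      simp [PySem.Chars.splitOn.go] at hp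
      rcases hp with h | h
      · exact hacc _ h
      · subst h; simpa using hinv
    | cons c rest =>
      rw [PySem.Chars.splitOn.go] at hp
      by_cases hpre : sep.isPrefixOf (c :: rest) = true
      · simp only [hpre, if_true] at hp
        have hl : (c :: rest) <:+: s := ((List.suffix_append _ _).isInfix).trans hinv
        refine ih _ _ _ ?_ ?_ p hp
        · simpa using ((List.drop_suffix sep.length (c :: rest)).isInfix).trans hl
        · intro q hq
          rcases List.mem_cons.mp hq with hq | hq
          · exact hq ▸ ((List.prefix_append _ _).isInfix).trans hinv
          · exact hacc _ hq
      · simp only [hpre] at hp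
        refine ih _ _ _ ?_ hacc p hp
        simpa using hinv

theorem pv_mem_splitOn_infix (s sep p : List Char) (hp : p ∈ PySem.Chars.splitOn s sep) :
    p <:+: s := by
  refine pv_go_infix sep s (s.length+1) s [] [] (by simp) (by simp) p ?_
  simpa [PySem.Chars.splitOn] using hp

-- a sentence of text.split('.') is an infix of text
theorem pv_mem_split_infix (text sentence : String)
    (h : sentence ∈ (PySem.Str.split? text ".").getD []) :
    sentence.toList <:+: text.toList := by
  have hb := PySem.Str.split?_map text "."
  have hsep : (".".toList : List Char) = ['.'] := by decide
  rw [hsep] at hb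
  have hsome : PySem.Chars.split? text.toList ['.'] =
      some (PySem.Chars.splitOn text.toList ['.']) := by
    simp [PySem.Chars.split?]
  rw [hsome] at hb
  cases hopt : PySem.Str.split? text "." with
  | none => rw [hopt] at hb; simp at hb
  | some pieces =>
    rw [hopt] at hb
    simp only [Option.map_some, Option.some.injEq] at hb
    rw [hopt] at h
    simp only [Option.getD_some] at h
    have : sentence.toList ∈ PySem.Chars.splitOn text.toList ['.'] := by
      rw [← hb]; exact List.mem_map_of_mem h
    exact pv_mem_splitOn_infix _ _ _ this

-- a fold of Set.add over a list whose elements all equal m leaves [m] unchanged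
theorem pv_foldl_add_const (m : String) :
    ∀ (xs : List String), (∀ x ∈ xs, x = m) → xs.foldl PySem.Set.add [m] = [m] := by
  intro xs
  induction xs with
  | nil => intro _; rfl
  | cons y ys ih =>
    intro h
    have hy : y = m := h y (by simp)
    have : PySem.Set.add [m] y = [m] := by
      subst hy; simp [PySem.Set.add, PySem.Set.contains]
    simp only [List.foldl_cons, this]
    exact ih (fun x hx => h x (by simp [hx]))

theorem pv_ofList_const (m : String) (xs : List String) (hne : xs ≠ [])
    (h : ∀ x ∈ xs, x = m) : PySem.Set.ofList xs = [m] := by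
  cases xs with
  | nil => exact absurd rfl hne
  | cons y ys =>
    have hy : y = m := h y (by simp)
    rw [PySem.Set.ofList_eq_foldl]
    simp only [List.foldl_cons]
    have hadd : PySem.Set.add [] y = [m] := by
      subst hy; simp [PySem.Set.add, PySem.Set.contains]
    rw [show PySem.Set.add ([] : PySem.Set String) y = [m] from hadd]
    exact pv_foldl_add_const m ys (fun x hx => h x (by simp [hx]))

-- A's steps accumulator in closed form
theorem pv_stepsA_eq (text : String) :
    ∀ (inds : List String) (acc : List String),
      inds.foldl (fun steps indicator =>
        if PySem.Str.isIn indicator text then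
          ((PySem.Str.split? text ".").getD []).foldl (fun steps sentence =>
            if PySem.Str.isIn indicator sentence then steps ++ [PySem.Str.strip sentence]
            else steps) steps
        else steps) acc
      = acc ++ inds.flatMap (fun indicator =>
          if PySem.Str.isIn indicator text then
            (((PySem.Str.split? text ".").getD []).filter
              (fun sentence => PySem.Str.isIn indicator sentence)).map PySem.Str.strip
          else []) := by
  intro inds
  induction inds with
  | nil => intro acc; simp
  | cons i rest ih =>
    intro acc
    simp only [List.foldl_cons, List.flatMap_cons]
    by_cases hi : PySem.Str.isIn i text = true
    · rw [if_pos hi, PySem.List.foldl_append_if, ih, if_pos hi, List.append_assoc]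
    · rw [if_neg hi, ih, if_neg hi, List.nil_append]

-- ===== VERDICT (by name: the statement is the Claim_ definition above) =====
theorem find_next_steps_py_spec : Claim_equal_find_next_steps_py := by
  intro text _ hpre
  unfold Pre_find_next_steps_py at hpre
  unfold Spec_find_next_steps_py
  simp only [find_next_steps_py, find_next_steps_py_alt]
  rw [pv_stepsA_eq text _ [], List.nil_append, PySem.List.dedup_eq_ofList]
  generalize hS : (PySem.Str.split? text ".").getD [] = sentences at *
  generalize hI : (["next step", "next week", "follow up", "continue", "move forward"] : List String) = inds at *
  set F : List String := sentences.filter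
      (fun sentence => inds.any (fun ind => PySem.Str.isIn ind sentence)) with hF
  set M : List String := F.map PySem.Str.strip with hM
  set SA : List String := inds.flatMap (fun indicator =>
      if PySem.Str.isIn indicator text = true then
        (sentences.filter (fun sentence => PySem.Str.isIn indicator sentence)).map PySem.Str.strip
      else []) with hSA
  have hAtoM : ∀ x ∈ SA, x ∈ M := by
    intro x hx
    rw [hSA] at hx
    simp only [List.mem_flatMap] at hx
    obtain ⟨ind, hind, hx⟩ := hx
    by_cases hit : PySem.Str.isIn ind text = true
    · rw [if_pos hit] at hx
      simp only [List.mem_map, List.mem_filter] at hx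
      obtain ⟨s, ⟨hs, hsin⟩, hstrip⟩ := hx
      rw [hM, hF]
      exact hstrip ▸ List.mem_map_of_mem
        (List.mem_filter.mpr ⟨hs, List.any_eq_true.mpr ⟨ind, hind, hsin⟩⟩)
    · rw [if_neg hit] at hx; simp at hx
  have hMtoSA : ∀ x ∈ M, x ∈ SA := by
    intro x hx
    rw [hM, hF] at hx
    simp only [List.mem_map, List.mem_filter, List.any_eq_true] at hx
    obtain ⟨s, ⟨hs, ind, hind, hsin⟩, hstrip⟩ := hx
    have hit : PySem.Str.isIn ind text = true := by
      rw [PySem.Str.isIn_iff_infix]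
      have h1 : ind.toList <:+: s.toList := (PySem.Str.isIn_iff_infix ind s).mp hsin
      have h2 : s.toList <:+: text.toList := pv_mem_split_infix text s (hS ▸ hs)
      exact h1.trans h2
    rw [hSA]
    simp only [List.mem_flatMap]
    exact ⟨ind, hind, by
      rw [if_pos hit]
      exact hstrip ▸ List.mem_map_of_mem (List.mem_filter.mpr ⟨hs, hsin⟩)⟩
  cases hMc : M with
  | nil =>
    have hSAnil : SA = [] := by
      rw [List.eq_nil_iff_forall_not_mem]
      intro x hx
      have := hAtoM x hx
      rw [hMc] at this
      exact (List.not_mem_nil).elim this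
    simp [hSAnil]
  | cons m t =>
    have hMpw : M.Pairwise (fun a b => a = b) := by
      rw [hM, List.pairwise_map]
      exact hpre
    have hallM : ∀ x ∈ M, x = m := by
      rw [hMc] at hMpw
      intro x hx
      rw [hMc] at hx
      rcases List.mem_cons.mp hx with h | h
      · exact h
      · exact (List.rel_of_pairwise_cons hMpw h).symm
    have hmSA : m ∈ SA := hMtoSA m (hMc ▸ List.mem_cons_self)
    have h1 : PySem.Set.ofList SA = [m] :=
      pv_ofList_const m SA (List.ne_nil_of_mem hmSA) (fun x hx => hallM x (hAtoM x hx))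
    have h2 : PySem.Set.ofList M = [m] :=
      pv_ofList_const m M (by rw [hMc]; exact List.cons_ne_nil _ _) hallM
    rw [h1, ← hMc, h2]
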